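-- pv_equiv track=rewrite | github.com/koenvo/remote-executor | src/remote_executor/backends/modal_backend.py | _extra_ignores_from_profile
-- ===== SOURCE A (Python) =====
-- def _extra_ignores_from_profile(sync_ignore: list[str]) -> set[str]:
--     """Extract plain directory/file names from mutagen glob patterns so the
--     Modal backend (which uses simple path-component matching) can honor the
--     same exclusions the user configured for the mutagen sync."""
--     extras: set[str] = set()
--     for pattern in sync_ignore:
--         # Strip trailing slashes, leading **/  /  , glob markers
--         stripped = pattern.strip().rstrip("/")
--         while stripped.startswith(("**/", "*/")):
--             stripped = stripped.split("/", 1)[1] if "/" in stripped else ""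
--         if stripped and "*" not in stripped and "/" not in stripped:
--             extras.add(stripped)
--     return extras
-- ===== SOURCE B (Python) =====
-- def _extra_ignores_from_profile(sync_ignore: list[str]) -> set[str]:
--     """Extract plain directory/file names from mutagen glob patterns.
--
--     Direct characterization: a pattern contributes its LAST '/'-component
--     iff that component is non-empty and star-free and EVERY preceding
--     component is a bare wildcard ('*' or '**').  No prefix-peeling loop."""
--     def plain_name(pattern):
--         parts = pattern.strip().rstrip("/").split("/")
--         name = parts[-1]
--         if name and "*" not in name and all(p in ("*", "**") for p in parts[:-1]):
--             return name
--         return None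
--     return {name for name in map(plain_name, sync_ignore) if name is not None}
-- ===== Notes on version B (the rewrite author's own statement) =====
-- stated objective: simpler
-- what changed: Replaces A's prefix-peeling while-loop (repeated startswith + split('/',1)) with a direct declarative characterization: keep the pattern's last '/'-component iff it is non-empty, star-free, and every preceding component is a bare '*' or '**', written as a set comprehension over a total classifier helper.
import Mathlib
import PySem

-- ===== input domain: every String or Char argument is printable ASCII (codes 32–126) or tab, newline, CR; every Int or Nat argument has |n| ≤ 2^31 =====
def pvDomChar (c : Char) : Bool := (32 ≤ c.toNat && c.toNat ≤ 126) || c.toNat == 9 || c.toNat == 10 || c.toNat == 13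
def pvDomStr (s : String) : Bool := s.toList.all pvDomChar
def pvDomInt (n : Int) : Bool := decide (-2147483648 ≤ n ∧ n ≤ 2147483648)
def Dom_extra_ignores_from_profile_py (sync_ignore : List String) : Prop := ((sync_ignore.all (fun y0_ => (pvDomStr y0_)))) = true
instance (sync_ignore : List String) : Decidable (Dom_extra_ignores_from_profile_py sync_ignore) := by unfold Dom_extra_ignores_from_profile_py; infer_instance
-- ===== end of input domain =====

-- B replaces A's prefix-peeling while-loop with a direct characterization: keep the
-- LAST '/'-component iff it is non-empty and star-free and ALL preceding components are
-- bare wildcards '*'/'**' (objective: simpler).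

-- ===== PORT A =====
-- shared preprocessing: pattern.strip().rstrip("/")
-- rstrip("/") ported by hand (PySem has no rstrip-with-chars): drop trailing '/' characters — exact.
def pvRstripSlash (s : List Char) : List Char := (s.reverse.dropWhile (· == '/')).reverse

def pvPrep (pattern : String) : List Char := pvRstripSlash (PySem.Chars.strip pattern.toList)

-- the while-loop: while stripped.startswith(("**/","*/")):
--   stripped = stripped.split("/",1)[1] if "/" in stripped else ""
-- split("/",1)[1] (guarded by "/" in stripped) ported by hand as the suffix after the
-- first '/': (s.dropWhile (· ≠ '/')).drop 1 — exact when '/' is present.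
def pvPeelA (s : List Char) : List Char :=
  if PySem.Chars.startswith s ['*', '*', '/'] || PySem.Chars.startswith s ['*', '/'] then
    pvPeelA (if ('/' : Char) ∈ s then (s.dropWhile (· ≠ '/')).drop 1 else [])
  else s
termination_by s.length
decreasing_by
  rename_i hcond
  split_ifs with hmem
  · -- '/' ∈ s: dropWhile result starts with '/', so dropping it strictly shrinks
    have hne : s.dropWhile (· ≠ '/') ≠ [] := by
      intro hnil
      have := (List.dropWhile_eq_nil_iff).1 hnil
      simpa using this '/' hmem
    have h1 : (s.dropWhile (· ≠ '/')).length ≤ s.length := List.length_dropWhile_le _ _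
    have h2 : 0 < (s.dropWhile (· ≠ '/')).length := List.length_pos_iff.2 hne
    simp only [List.length_drop]
    omega
  · -- '/' ∉ s: but the loop condition forces a '/', contradiction
    exfalso
    rcases Bool.or_eq_true_iff.1 hcond with h | h <;>
    · obtain ⟨t, ht⟩ := (PySem.Chars.startswith_iff _ _).1 h
      subst ht; simp at hmem

-- Python '"*" in stripped' / '"/" in stripped': single-character substring tests,
-- ported exactly as character membership.
def extra_ignores_from_profile_py (sync_ignore : List String) : List String :=
  sync_ignore.foldl (fun extras pattern =>
    let stripped := pvPeelA (pvPrep pattern)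
    if stripped ≠ [] ∧ ('*' : Char) ∉ stripped ∧ ('/' : Char) ∉ stripped then
      PySem.Set.add extras (String.ofList stripped)
    else extras) PySem.Set.empty

-- ===== PORT B =====
-- parts[-1] of the non-empty split list → getLastD []; parts[:-1] → dropLast — exact
-- (str.split always returns a non-empty list). The set comprehension over
-- map(plain_name, sync_ignore) builds the set in iteration order, as PySem.Set.add does.
def pvPlainName (pattern : String) : Option (List Char) :=
  let parts := PySem.Chars.splitOn (pvPrep pattern) ['/']
  let name := parts.getLastD []
  if name ≠ [] ∧ ('*' : Char) ∉ name ∧ parts.dropLast.all (fun p => p = ['*'] || p = ['*', '*']) then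
    some name
  else none

def extra_ignores_from_profile_py_alt (sync_ignore : List String) : List String :=
  (sync_ignore.map pvPlainName).foldl (fun extras name? =>
    match name? with
    | some name => PySem.Set.add extras (String.ofList name)
    | none => extras) PySem.Set.empty

-- ===== PRECONDITION & SPEC =====
def Spec_extra_ignores_from_profile_py (sync_ignore : List String) (out : List String) : Prop := out = extra_ignores_from_profile_py_alt sync_ignore
instance (sync_ignore : List String) (out : List String) : Decidable (Spec_extra_ignores_from_profile_py sync_ignore out) := by unfold Spec_extra_ignores_from_profile_py; infer_instance

-- ===== CLAIM (what is proved, stated in full; the proofs are below) =====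
def Claim_equal_extra_ignores_from_profile_py : Prop := ∀ (sync_ignore : List String), Dom_extra_ignores_from_profile_py sync_ignore → Spec_extra_ignores_from_profile_py sync_ignore (extra_ignores_from_profile_py sync_ignore)

-- ===== LEMMAS AND PROOFS =====

-- simple structural single-character split, used to characterise PySem.Chars.splitOn
def pvSplitSimple : List Char → List (List Char)
  | [] => [[]]
  | c :: rest =>
    if c = '/' then [] :: pvSplitSimple rest
    else
      match pvSplitSimple rest with
      | r :: rs => (c :: r) :: rs
      | [] => [[c]]

theorem pvSplitSimple_ne_nil (s : List Char) : pvSplitSimple s ≠ [] := by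
  cases s with
  | nil => simp [pvSplitSimple]
  | cons c rest =>
    simp only [pvSplitSimple]
    split
    · simp
    · split <;> simp

def pvConsHead (pre : List Char) : List (List Char) → List (List Char)
  | [] => [pre]
  | r :: rs => (pre ++ r) :: rs

theorem pvGo_eq (l : List Char) : ∀ (fuel : Nat), l.length ≤ fuel →
    ∀ (cur : List Char) (acc : List (List Char)),
    PySem.Chars.splitOn.go ['/'] fuel l cur acc = acc.reverse ++ pvConsHead cur.reverse (pvSplitSimple l) := by
  induction l with
  | nil =>
    intro fuel _ cur acc
    cases fuel <;> simp [PySem.Chars.splitOn.go, pvSplitSimple, pvConsHead]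
  | cons c rest ih =>
    intro fuel hf cur acc
    cases fuel with
    | zero => simp at hf
    | succ f =>
      have hf' : rest.length ≤ f := by simpa using hf
      by_cases hc : c = '/'
      · subst hc
        simp only [PySem.Chars.splitOn.go, List.isPrefixOf, BEq.rfl, Bool.true_and,
          if_true, List.length_cons, List.drop_succ_cons, List.length_nil, List.drop_zero]
        rw [ih f hf' [] (cur.reverse :: acc)]
        obtain ⟨r, rs, hr⟩ : ∃ r rs, pvSplitSimple rest = r :: rs := by
          cases h : pvSplitSimple rest with
          | nil => exact absurd h (pvSplitSimple_ne_nil rest)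
          | cons r rs => exact ⟨r, rs, rfl⟩
        simp [pvSplitSimple, pvConsHead, hr]
      · have hpre : ['/'].isPrefixOf (c :: rest) = false := by
          simp [List.isPrefixOf]
          exact fun h => absurd h.symm hc
        simp only [PySem.Chars.splitOn.go, hpre, if_false, Bool.false_eq_true]
        rw [ih f hf' (c :: cur) acc]
        obtain ⟨r, rs, hr⟩ : ∃ r rs, pvSplitSimple rest = r :: rs := by
          cases h : pvSplitSimple rest with
          | nil => exact absurd h (pvSplitSimple_ne_nil rest)
          | cons r rs => exact ⟨r, rs, rfl⟩
        simp [pvSplitSimple, pvConsHead, hr, hc]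

theorem pvSplitOn_eq (s : List Char) : PySem.Chars.splitOn s ['/'] = pvSplitSimple s := by
  unfold PySem.Chars.splitOn
  rw [pvGo_eq s (s.length + 1) (by omega) [] []]
  obtain ⟨r, rs, hr⟩ : ∃ r rs, pvSplitSimple s = r :: rs := by
    cases h : pvSplitSimple s with
    | nil => exact absurd h (pvSplitSimple_ne_nil s)
    | cons r rs => exact ⟨r, rs, rfl⟩
  simp [pvConsHead, hr]

theorem pvSplitSimple_no_slash (s : List Char) (h : ('/' : Char) ∉ s) :
    pvSplitSimple s = [s] := by
  induction s with
  | nil => simp [pvSplitSimple]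
  | cons c rest ih =>
    have hc : c ≠ '/' := fun hc => h (by simp [hc])
    have hr : ('/' : Char) ∉ rest := fun hm => h (by simp [hm])
    simp [pvSplitSimple, hc, ih hr]

theorem pvSplitSimple_slash (s : List Char) (h : ('/' : Char) ∈ s) :
    pvSplitSimple s = s.takeWhile (· ≠ '/') :: pvSplitSimple ((s.dropWhile (· ≠ '/')).drop 1) := by
  induction s with
  | nil => simp at h
  | cons c rest ih =>
    by_cases hc : c = '/'
    · subst hc
      simp [pvSplitSimple, List.takeWhile, List.dropWhile]
    · have hm : ('/' : Char) ∈ rest := by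
        rcases List.mem_cons.1 h with h1 | h1
        · exact absurd h1.symm hc
        · exact h1
      obtain ⟨r, rs, hr⟩ : ∃ r rs, pvSplitSimple rest = r :: rs := by
        cases h' : pvSplitSimple rest with
        | nil => exact absurd h' (pvSplitSimple_ne_nil rest)
        | cons r rs => exact ⟨r, rs, rfl⟩
      rw [ih hm] at hr
      simp only [pvSplitSimple, hc, if_false]
      rw [List.takeWhile_cons_of_pos (by simpa using hc),
        List.dropWhile_cons_of_pos (by simpa using hc)]
      cases hr' : rs <;> simp_all

theorem pvDropWhile_slash (cs : List Char) (hs : ('/' : Char) ∈ cs) :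
    ∃ t, cs.dropWhile (· ≠ '/') = '/' :: t := by
  induction cs with
  | nil => simp at hs
  | cons a rest ih =>
    by_cases ha : a = '/'
    · subst ha
      exact ⟨rest, by simp [List.dropWhile]⟩
    · have hm : ('/' : Char) ∈ rest := by
        rcases List.mem_cons.1 hs with h | h
        · exact absurd h.symm ha
        · exact h
      obtain ⟨t, ht⟩ := ih hm
      refine ⟨t, ?_⟩
      rw [List.dropWhile_cons_of_pos (by simp [ha])]
      exact ht

-- per-pattern selection of A
def pvSelA (cs : List Char) : Option (List Char) :=
  let t := pvPeelA cs
  if t ≠ [] ∧ ('*' : Char) ∉ t ∧ ('/' : Char) ∉ t then some t else none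

-- B's selection applied to the char list (pvPlainName = pvSelB ∘ pvPrep by definition)
def pvSelB (cs : List Char) : Option (List Char) :=
  let parts := PySem.Chars.splitOn cs ['/']
  let name := parts.getLastD []
  if name ≠ [] ∧ ('*' : Char) ∉ name ∧ parts.dropLast.all (fun p => p = ['*'] || p = ['*', '*']) then
    some name
  else none

theorem pvSel_eq (cs : List Char) : pvSelA cs = pvSelB cs := by
  generalize hn : cs.length = n
  induction n using Nat.strong_induction_on generalizing cs with
  | _ n ih =>
  by_cases h1 : PySem.Chars.startswith cs ['*', '*', '/'] = true
  · obtain ⟨t, ht⟩ := (PySem.Chars.startswith_iff _ _).1 h1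
    subst ht
    simp only [List.cons_append, List.nil_append] at hn h1 ⊢
    have hpeel : pvPeelA ('*' :: '*' :: '/' :: t) = pvPeelA t := by
      rw [pvPeelA.eq_def]
      simp [PySem.Chars.startswith, List.isPrefixOf, List.dropWhile]
    have hsplit : pvSplitSimple ('*' :: '*' :: '/' :: t) = ['*', '*'] :: pvSplitSimple t := by
      simp [pvSplitSimple]
    obtain ⟨r, rs, hr⟩ : ∃ r rs, pvSplitSimple t = r :: rs := by
      cases h' : pvSplitSimple t with
      | nil => exact absurd h' (pvSplitSimple_ne_nil t)
      | cons r rs => exact ⟨r, rs, rfl⟩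
    have hA : pvSelA ('*' :: '*' :: '/' :: t) = pvSelA t := by
      simp only [pvSelA, hpeel]
    have hB : pvSelB ('*' :: '*' :: '/' :: t) = pvSelB t := by
      simp only [pvSelB, pvSplitOn_eq, hsplit, hr]
      simp
    rw [hA, hB]
    exact ih t.length (by simp at hn; omega) t rfl
  · by_cases h2 : PySem.Chars.startswith cs ['*', '/'] = true
    · obtain ⟨t, ht⟩ := (PySem.Chars.startswith_iff _ _).1 h2
      subst ht
      simp only [List.cons_append, List.nil_append] at hn h1 h2 ⊢
      have hpeel : pvPeelA ('*' :: '/' :: t) = pvPeelA t := by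
        rw [pvPeelA.eq_def]
        simp [PySem.Chars.startswith, List.isPrefixOf, List.dropWhile]
      have hsplit : pvSplitSimple ('*' :: '/' :: t) = ['*'] :: pvSplitSimple t := by
        simp [pvSplitSimple]
      obtain ⟨r, rs, hr⟩ : ∃ r rs, pvSplitSimple t = r :: rs := by
        cases h' : pvSplitSimple t with
        | nil => exact absurd h' (pvSplitSimple_ne_nil t)
        | cons r rs => exact ⟨r, rs, rfl⟩
      have hA : pvSelA ('*' :: '/' :: t) = pvSelA t := by
        simp only [pvSelA, hpeel]
      have hB : pvSelB ('*' :: '/' :: t) = pvSelB t := by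
        simp only [pvSelB, pvSplitOn_eq, hsplit, hr]
        simp
      rw [hA, hB]
      exact ih t.length (by simp at hn; omega) t rfl
    · -- the while-loop does not fire: pvPeelA cs = cs
      have hpeel : pvPeelA cs = cs := by
        rw [pvPeelA.eq_def]
        simp [h1, h2]
      by_cases hs : ('/' : Char) ∈ cs
      · -- A rejects ('/' present); B: the first component sits in parts[:-1] and is not '*'/'**'
        have hA : pvSelA cs = none := by simp [pvSelA, hpeel, hs]
        have htk : cs = cs.takeWhile (· ≠ '/') ++ cs.dropWhile (· ≠ '/') :=
          (List.takeWhile_append_dropWhile).symm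
        obtain ⟨t, hdw⟩ := pvDropWhile_slash cs hs
        have hhead : cs.takeWhile (· ≠ '/') ≠ ['*'] ∧ cs.takeWhile (· ≠ '/') ≠ ['*', '*'] := by
          constructor
          · intro hq
            apply h2
            rw [(PySem.Chars.startswith_iff _ _)]
            refine ⟨t, ?_⟩
            conv_rhs => rw [htk]
            rw [hq, hdw]
            rfl
          · intro hq
            apply h1
            rw [(PySem.Chars.startswith_iff _ _)]
            refine ⟨t, ?_⟩
            conv_rhs => rw [htk]
            rw [hq, hdw]
            rfl
        have hB : pvSelB cs = none := by
          rw [pvSelB]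
          obtain ⟨r, rs, hr⟩ : ∃ r rs, pvSplitSimple ((cs.dropWhile (· ≠ '/')).drop 1) = r :: rs := by
            cases h' : pvSplitSimple ((cs.dropWhile (· ≠ '/')).drop 1) with
            | nil => exact absurd h' (pvSplitSimple_ne_nil _)
            | cons r rs => exact ⟨r, rs, rfl⟩
          simp only [pvSplitOn_eq, pvSplitSimple_slash cs hs, hr]
          rw [if_neg]
          rintro ⟨-, -, hall⟩
          rw [List.dropLast_cons₂, List.all_cons, Bool.and_eq_true] at hall
          rcases Bool.or_eq_true_iff.1 hall.1 with h | h
          · exact hhead.1 (by simpa using h)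
          · exact hhead.2 (by simpa using h)
        rw [hA, hB]
      · -- no '/': one component, empty prefix; the two conditions coincide
        have hsplit : pvSplitSimple cs = [cs] := pvSplitSimple_no_slash cs hs
        rw [pvSelA, pvSelB]
        simp only [pvSplitOn_eq, hsplit, hpeel]
        have hname : ([cs] : List (List Char)).getLastD [] = cs := rfl
        have hdl : (([cs] : List (List Char)).dropLast.all (fun p => p = ['*'] || p = ['*', '*'])) = true := rfl
        rw [hname, hdl]
        by_cases hcond : cs ≠ [] ∧ ('*' : Char) ∉ cs
        · rw [if_pos ⟨hcond.1, hcond.2, hs⟩, if_pos ⟨hcond.1, hcond.2, rfl⟩]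
        · rw [if_neg (by tauto), if_neg (by tauto)]

theorem pvFold_eq (sync_ignore : List String) (extras : List String) :
    sync_ignore.foldl (fun extras pattern =>
      let stripped := pvPeelA (pvPrep pattern)
      if stripped ≠ [] ∧ ('*' : Char) ∉ stripped ∧ ('/' : Char) ∉ stripped then
        PySem.Set.add extras (String.ofList stripped)
      else extras) extras =
    (sync_ignore.map pvPlainName).foldl (fun extras name? =>
      match name? with
      | some name => PySem.Set.add extras (String.ofList name)
      | none => extras) extras := by
  induction sync_ignore generalizing extras with
  | nil => rfl
  | cons p ps ih =>
    simp only [List.foldl_cons, List.map_cons]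
    have hsel : pvSelA (pvPrep p) = pvPlainName p := by
      rw [pvSel_eq]; rfl
    have hstep : (let stripped := pvPeelA (pvPrep p)
        if stripped ≠ [] ∧ ('*' : Char) ∉ stripped ∧ ('/' : Char) ∉ stripped then
          PySem.Set.add extras (String.ofList stripped)
        else extras) =
        (match pvPlainName p with
        | some name => PySem.Set.add extras (String.ofList name)
        | none => extras) := by
      rcases Decidable.em (pvPeelA (pvPrep p) ≠ [] ∧ ('*' : Char) ∉ pvPeelA (pvPrep p) ∧ ('/' : Char) ∉ pvPeelA (pvPrep p)) with hc | hc
      · rw [show pvPlainName p = some (pvPeelA (pvPrep p)) from by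
          rw [← hsel]; simp only [pvSelA]; exact if_pos hc]
        exact if_pos hc
      · rw [show pvPlainName p = none from by
          rw [← hsel]; simp only [pvSelA]; exact if_neg hc]
        exact if_neg hc
    rw [hstep]
    exact ih _

-- ===== VERDICT (by name: the statement is the Claim_ definition above) =====
theorem extra_ignores_from_profile_py_spec : Claim_equal_extra_ignores_from_profile_py := by
  intro sync_ignore _
  unfold Spec_extra_ignores_from_profile_py
  unfold extra_ignores_from_profile_py extra_ignores_from_profile_py_alt
  exact pvFold_eq sync_ignore PySem.Set.empty
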